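-- pv_equiv track=rewrite | github.com/tytuswota/connectedSystems | my_controller.py | isObstacleBot
-- ===== SOURCE A (Python) =====
-- botLocations = [[0,10], [0,0], [10,10], [10,0]]
--
-- def isObstacleBot(pos):
--     try:
--         for locations in botLocations:
--             if pos[0] == locations[0] and pos[1] == locations[1]:
--                 return True
--         return False
--     except:
--         return False
-- ===== SOURCE B (Python) =====
-- botLocations = [[0,10], [0,0], [10,10], [10,0]]
--
-- def isObstacleBot(pos):
--     # botLocations is exactly {0,10} x {0,10}: test per coordinate instead of scanning.
--     try:
--         return pos[0] in (0, 10) and pos[1] in (0, 10)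
--     except:
--         return False
-- ===== Notes on version B (the rewrite author's own statement) =====
-- stated objective: simpler
-- what changed: Replaces the scan over the 4-element botLocations list with a closed-form per-coordinate membership test in {0,10}x{0,10}, keeping the try/except so short positions still return False.
import Mathlib
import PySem

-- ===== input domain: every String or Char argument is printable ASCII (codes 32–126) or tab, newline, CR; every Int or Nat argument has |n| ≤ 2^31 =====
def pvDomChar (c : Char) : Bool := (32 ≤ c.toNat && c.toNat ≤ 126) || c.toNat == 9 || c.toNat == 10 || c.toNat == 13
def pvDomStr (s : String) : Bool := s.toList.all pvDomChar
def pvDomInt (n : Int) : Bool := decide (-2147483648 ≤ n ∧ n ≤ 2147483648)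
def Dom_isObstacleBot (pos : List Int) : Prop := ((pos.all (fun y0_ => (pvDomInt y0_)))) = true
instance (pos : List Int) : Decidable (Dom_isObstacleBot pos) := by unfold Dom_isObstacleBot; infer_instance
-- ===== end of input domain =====

-- B replaces A's scan over the constant location list with a per-coordinate
-- membership test in {0,10}×{0,10} (simpler; same values, including on short lists).

-- ===== PORT A =====
def botLocations : List (List Int) := [[0,10], [0,0], [10,10], [10,0]]

-- the for-loop over botLocations; any IndexError (pyGet? = none) makes the whole
-- function return false (Python's bare except)
def isObstacleBotLoop (pos : List Int) : List (List Int) → Bool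
  | [] => false
  | locations :: rest =>
    match PySem.List.pyGet? pos 0, PySem.List.pyGet? locations 0 with
    | none, _ => false            -- pos[0] raises → except → False
    | _, none => false            -- locations[0] raises (never happens for botLocations)
    | some p0, some l0 =>
      if p0 = l0 then
        match PySem.List.pyGet? pos 1, PySem.List.pyGet? locations 1 with
        | none, _ => false        -- pos[1] raises → except → False
        | _, none => false
        | some p1, some l1 => if p1 = l1 then true else isObstacleBotLoop pos rest
      else isObstacleBotLoop pos rest

def isObstacleBot (pos : List Int) : Bool := isObstacleBotLoop pos botLocations

-- ===== PORT B =====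
def isObstacleBot_alt (pos : List Int) : Bool :=
  match PySem.List.pyGet? pos 0 with
  | none => false                 -- pos[0] raises → except → False
  | some x =>
    if x = 0 ∨ x = 10 then
      match PySem.List.pyGet? pos 1 with
      | none => false             -- pos[1] raises → except → False
      | some y => decide (y = 0 ∨ y = 10)
    else false                    -- short-circuit: pos[1] never touched

-- ===== PRECONDITION & SPEC =====
def Spec_isObstacleBot (pos : List Int) (out : Bool) : Prop := out = isObstacleBot_alt pos
instance (pos : List Int) (out : Bool) : Decidable (Spec_isObstacleBot pos out) := by unfold Spec_isObstacleBot; infer_instance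

-- ===== CLAIM (what is proved, stated in full; the proofs are below) =====
def Claim_equal_isObstacleBot : Prop := ∀ (pos : List Int), Dom_isObstacleBot pos → Spec_isObstacleBot pos (isObstacleBot pos)

-- ===== LEMMAS AND PROOFS =====
theorem pvGet0 (x : Int) (l : List Int) : PySem.List.pyGet? (x :: l) 0 = some x :=
  PySem.List.pyGet?_zero_cons x l

theorem pvGet1 (x y : Int) (l : List Int) : PySem.List.pyGet? (x :: y :: l) 1 = some y := by
  have : ((1:Int)) = ((1:Nat):Int) := rfl
  rw [this, PySem.List.pyGet?_natCast]; rfl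

theorem pvGet1none (x : Int) : PySem.List.pyGet? [x] 1 = none := by
  have : ((1:Int)) = ((1:Nat):Int) := rfl
  rw [this, PySem.List.pyGet?_natCast]; rfl

theorem isObstacleBot_eq_alt (pos : List Int) : isObstacleBot pos = isObstacleBot_alt pos := by
  match pos with
  | [] => rfl
  | [x] =>
    simp only [isObstacleBot, isObstacleBot_alt, botLocations, isObstacleBotLoop,
      pvGet0, pvGet1none]
    by_cases h0 : x = 0 <;> by_cases h10 : x = 10 <;> simp [h0, h10]
  | x :: y :: t =>
    simp only [isObstacleBot, isObstacleBot_alt, botLocations, isObstacleBotLoop,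
      pvGet0, pvGet1]
    by_cases h0 : x = 0 <;> by_cases h10 : x = 10 <;>
      by_cases g0 : y = 0 <;> by_cases g10 : y = 10 <;>
      simp [h0, h10, g0, g10]

-- ===== VERDICT (by name: the statement is the Claim_ definition above) =====
theorem isObstacleBot_spec : Claim_equal_isObstacleBot := by
  intro pos _
  exact isObstacleBot_eq_alt pos
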